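-- pv_equiv track=rewrite | github.com/andlaf-ak/pizzalang | generate_print.py | encode_line_to_pizzavm
-- ===== SOURCE A (Python) =====
-- import math
--
-- def generate_pizza_instructions(target_ascii):
--     if target_ascii < 1:
--         return ["Z"]  # Just clear the memory for 0
--     instructions = ["Z", "I"]  # Start from 1
--     doubles = int(math.log2(target_ascii))
--     base = 2 ** doubles
--     increments = target_ascii - base
--     instructions += ["IZ"] * doubles
--     instructions += ["I"] * increments
--     return instructions
--
-- def encode_line_to_pizzavm(line):
--     instrs = []
--     for char in line:
--         ascii_val = ord(char)
--         instrs += generate_pizza_instructions(ascii_val)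
--         instrs.append("PIZZ")  # Move to next memory cell
--
--     # Add null terminator (0) at end
--     instrs.append("Z")       # Zero out this memory cell
--
--     # Move pointer back to start of string
--     instrs += ["PIZ"] * len(line)
--
--     # Print ASCIIZ string
--     instrs.append("P")
--
--     return instrs
-- ===== SOURCE B (Python) =====
-- def _char_code(n):
--     # highest power of two <= n via an iterative doubling loop (no math.log2)
--     if n < 1:
--         return ["Z"]
--     base, doubles = 1, 0
--     while base * 2 <= n:
--         base *= 2
--         doubles += 1
--     return ["Z", "I"] + ["IZ"] * doubles + ["I"] * (n - base)
--
-- def encode_line_to_pizzavm(line):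
--     return [i for ch in line for i in _char_code(ord(ch)) + ["PIZZ"]] \
--         + ["Z"] + ["PIZ"] * len(line) + ["P"]
-- ===== Notes on version B (the rewrite author's own statement) =====
-- stated objective: alternative
-- what changed: Computes the highest power of two per character with an iterative doubling loop instead of math.log2, and builds the instruction list as one flat comprehension instead of a mutated accumulator.
import Mathlib
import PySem

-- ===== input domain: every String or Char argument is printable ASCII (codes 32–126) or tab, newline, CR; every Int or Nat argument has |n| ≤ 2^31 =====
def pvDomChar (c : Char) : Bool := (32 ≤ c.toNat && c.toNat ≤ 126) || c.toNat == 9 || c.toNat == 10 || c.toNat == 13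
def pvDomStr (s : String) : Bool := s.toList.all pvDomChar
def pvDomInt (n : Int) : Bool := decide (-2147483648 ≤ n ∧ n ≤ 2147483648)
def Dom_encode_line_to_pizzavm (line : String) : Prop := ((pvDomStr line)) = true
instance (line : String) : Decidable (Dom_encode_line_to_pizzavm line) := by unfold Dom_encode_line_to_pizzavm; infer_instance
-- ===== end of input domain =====

-- B replaces the math.log2 closed form by an iterative doubling loop and builds the
-- instruction list as one flat comprehension instead of a mutated accumulator
-- (objective: alternative decomposition, same exact output).

-- ===== PORT A =====
-- int(math.log2 n) for 1 ≤ n ≤ 126 is exactly floor(log2 n) = Nat.log2; exact on Dom's char codes.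
def generate_pizza_instructions (target_ascii : Int) : List String :=
  if target_ascii < 1 then ["Z"]
  else
    let instructions : List String := ["Z", "I"]
    let doubles : Nat := target_ascii.toNat.log2
    let base : Int := 2 ^ doubles
    let increments : Int := target_ascii - base
    (instructions ++ List.replicate doubles "IZ") ++ List.replicate increments.toNat "I"

def encode_line_to_pizzavm (line : String) : List String :=
  let instrs : List String :=
    line.toList.foldl (fun acc ch => (acc ++ generate_pizza_instructions (ch.toNat : Int)) ++ ["PIZZ"]) []
  ((instrs ++ ["Z"]) ++ List.replicate line.toList.length "PIZ") ++ ["P"]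

-- ===== PORT B =====
-- the while-loop of Source B; fuel = n bounds the ≤ log2 n iterations (base starts at 1 and doubles)
def pvDblLoop (fuel : Nat) (n : Nat) (base : Nat) (doubles : Nat) : Nat × Nat :=
  match fuel with
  | 0 => (base, doubles)
  | f + 1 => if base * 2 ≤ n then pvDblLoop f n (base * 2) (doubles + 1) else (base, doubles)

def pvCharCode (n : Int) : List String :=
  if n < 1 then ["Z"]
  else
    let p := pvDblLoop n.toNat n.toNat 1 0
    ["Z", "I"] ++ List.replicate p.2 "IZ" ++ List.replicate (n - (p.1 : Int)).toNat "I"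

def encode_line_to_pizzavm_alt (line : String) : List String :=
  (line.toList.flatMap (fun ch => pvCharCode (ch.toNat : Int) ++ ["PIZZ"]))
    ++ ["Z"] ++ List.replicate line.toList.length "PIZ" ++ ["P"]

-- ===== PRECONDITION & SPEC =====
def Spec_encode_line_to_pizzavm (line : String) (out : List String) : Prop := out = encode_line_to_pizzavm_alt line
instance (line : String) (out : List String) : Decidable (Spec_encode_line_to_pizzavm line out) := by unfold Spec_encode_line_to_pizzavm; infer_instance

-- ===== CLAIM (what is proved, stated in full; the proofs are below) =====
def Claim_equal_encode_line_to_pizzavm : Prop := ∀ (line : String), Dom_encode_line_to_pizzavm line → Spec_encode_line_to_pizzavm line (encode_line_to_pizzavm line)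

-- ===== LEMMAS AND PROOFS =====

-- per-character agreement on every code a Dom-admitted char can have
theorem pv_char_eq : ∀ n : Nat, n < 127 →
    generate_pizza_instructions (n : Int) = pvCharCode (n : Int) := by decide

theorem pv_dom_char_lt (c : Char) (h : pvDomChar c = true) : c.toNat < 127 := by
  simp [pvDomChar] at h
  omega

theorem pv_foldl_eq (l : List Char) (acc : List String)
    (h : ∀ c ∈ l, pvDomChar c = true) :
    l.foldl (fun acc ch => (acc ++ generate_pizza_instructions (ch.toNat : Int)) ++ ["PIZZ"]) acc
      = acc ++ l.flatMap (fun ch => pvCharCode (ch.toNat : Int) ++ ["PIZZ"]) := by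
  induction l generalizing acc with
  | nil => simp
  | cons c t ih =>
    have hc := pv_char_eq c.toNat (pv_dom_char_lt c (h c (by simp)))
    simp only [List.foldl_cons, List.flatMap_cons]
    rw [ih _ (fun x hx => h x (by simp [hx]))]
    simp [hc, List.append_assoc]

-- ===== VERDICT (by name: the statement is the Claim_ definition above) =====
theorem encode_line_to_pizzavm_spec : Claim_equal_encode_line_to_pizzavm := by
  intro line hdom
  unfold Spec_encode_line_to_pizzavm encode_line_to_pizzavm encode_line_to_pizzavm_alt
  have h : ∀ c ∈ line.toList, pvDomChar c = true := by
    simpa [Dom_encode_line_to_pizzavm, pvDomStr, List.all_eq_true] using hdom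
  rw [pv_foldl_eq line.toList [] h]
  simp [List.append_assoc]
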